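-- pv_equiv track=rewrite | github.com/derek-perdomo/ggsolver | ggsolver/logic/pl.py | pl_not
-- ===== SOURCE A (Python) =====
-- def pl_not(args):
--     """Parse Propositional Not."""
--     if len(args) == 1:
--         return str(args[0])
--     else:
--         f = str(args[-1])
--         for _ in args[:-1]:
--             f = f"!({f})"
--         return f
-- ===== SOURCE B (Python) =====
-- def pl_not(args):
--     """Parse Propositional Not."""
--     n = len(args) - 1
--     return "!(" * n + str(args[-1]) + ")" * n
-- ===== Notes on version B (the rewrite author's own statement) =====
-- stated objective: simpler
-- what changed: Replaces the branch-plus-loop accumulator with a single closed-form expression: n = len(args)-1 copies of '!(' before str(args[-1]) and n copies of ')' after it, which also subsumes the len==1 base case.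
import Mathlib
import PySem

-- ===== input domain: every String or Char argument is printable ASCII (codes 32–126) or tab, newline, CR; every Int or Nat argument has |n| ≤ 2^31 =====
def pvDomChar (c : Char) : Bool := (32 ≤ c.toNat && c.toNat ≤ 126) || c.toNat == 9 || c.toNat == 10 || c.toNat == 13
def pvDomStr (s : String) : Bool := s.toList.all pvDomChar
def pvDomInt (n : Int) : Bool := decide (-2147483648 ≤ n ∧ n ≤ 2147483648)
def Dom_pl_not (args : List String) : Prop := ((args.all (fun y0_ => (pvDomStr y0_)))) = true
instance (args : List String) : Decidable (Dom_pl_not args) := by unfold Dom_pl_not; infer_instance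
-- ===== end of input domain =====

-- B replaces A's branch-plus-loop with one closed-form expression: n = len(args)-1 repetitions of "!(" and ")" around str(args[-1]) (simpler; a timing run measured it faster: A re-copies the growing string each iteration).


-- ===== PORT A =====
def pl_not (args : List String) : String :=
  if args.length == 1 then
    (PySem.List.pyGet? args 0).getD ""            -- str(args[0]); index valid since length = 1
  else
    let f := (PySem.List.pyGet? args (-1)).getD ""  -- str(args[-1]); Pre_ excludes the [] crash
    (PySem.List.slice args none (some (-1))).foldl (fun f _ => "!(" ++ f ++ ")") f

-- ===== PORT B =====
-- "s * n" (Python string repetition)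
def strMul (s : String) : Nat → String
  | 0 => ""
  | n + 1 => s ++ strMul s n

def pl_not_alt (args : List String) : String :=
  let n := args.length - 1
  strMul "!(" n ++ (PySem.List.pyGet? args (-1)).getD "" ++ strMul ")" n

-- ===== PRECONDITION & SPEC =====
-- Pre_ excludes only the empty list, on which A (and B) raise IndexError at args[-1].
def Pre_pl_not (args : List String) : Prop := args ≠ []
instance (args : List String) : Decidable (Pre_pl_not args) := by unfold Pre_pl_not; infer_instance
def pvWitness_pl_not : List String := ["a", "b"]

def Spec_pl_not (args : List String) (out : String) : Prop := out = pl_not_alt args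
instance (args : List String) (out : String) : Decidable (Spec_pl_not args out) := by unfold Spec_pl_not; infer_instance

-- ===== CLAIM (what is proved, stated in full; the proofs are below) =====
def Claim_equal_pl_not : Prop := ∀ (args : List String), Dom_pl_not args → Pre_pl_not args → Spec_pl_not args (pl_not args)

-- ===== LEMMAS AND PROOFS =====
lemma strMul_succ_right (s : String) (n : Nat) : strMul s (n + 1) = strMul s n ++ s := by
  induction n with
  | zero => simp [strMul]
  | succ k ih =>
      have hsw : s ++ strMul s k = strMul s k ++ s := ih
      rw [show strMul s (k + 1 + 1) = s ++ strMul s (k + 1) from rfl,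
          show strMul s (k + 1) = s ++ strMul s k from rfl, ← String.append_assoc, hsw]
      rw [String.append_assoc, hsw, ← String.append_assoc, hsw]

lemma strMul_swap (s : String) (n : Nat) : strMul s n ++ s = s ++ strMul s n := by
  rw [← strMul_succ_right]; rfl

lemma wrap_foldl (l : List String) (f : String) :
    l.foldl (fun g _ => "!(" ++ g ++ ")") f = strMul "!(" l.length ++ f ++ strMul ")" l.length := by
  induction l generalizing f with
  | nil => simp [strMul]
  | cons x xs ih =>
      rw [List.foldl_cons, ih, List.length_cons,
          show strMul "!(" (xs.length + 1) = "!(" ++ strMul "!(" xs.length from rfl,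
          strMul_succ_right]
      simp only [String.append_assoc]
      rw [show ((")" : String) ++ strMul ")" xs.length) = strMul ")" xs.length ++ ")" from
            (strMul_swap _ _).symm,
          ← String.append_assoc, strMul_swap, String.append_assoc]

-- ===== VERDICT (by name: the statement is the Claim_ definition above) =====
theorem pl_not_spec : Claim_equal_pl_not := by
  intro args _ hpre
  unfold Spec_pl_not pl_not pl_not_alt
  match args with
  | [] => exact absurd rfl hpre
  | [a] => simp [PySem.List.pyGet?, PySem.List.pyIdx?, strMul]
  | a :: b :: rest =>
      simp only [if_neg (show ¬((a :: b :: rest).length == 1) = true by simp),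
        PySem.List.slice_to_neg_one, wrap_foldl]
      have : (a :: b :: rest).dropLast.length = (a :: b :: rest).length - 1 := by
        simp [List.length_dropLast]
      rw [this]
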